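-- pv_equiv track=rewrite | github.com/namratapadmanabhan/15112termproject | playerRulesCheck.py | determineOtherWords
-- ===== SOURCE A (Python) =====
-- def determineOtherWords(isConnectedToLetters, cell, filledCells):
--     boardPositions = [cell]
--     currPos = cell
--     if isConnectedToLetters:
--         newRow = currPos + 15
--         while (currPos + 15) in filledCells:
--             currPos += 15
--             boardPositions.append(currPos)
--         currPos = cell
--         prevRow = currPos - 15
--         while (currPos - 15) in filledCells:
--             currPos -= 15
--             boardPositions.append(currPos)
--     else:
--         newCell = currPos + 1
--         while ((currPos + 1) in filledCells) and (currPos%15 != 14):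
--             currPos += 1
--             boardPositions.append(currPos)
--         currPos = cell
--         prevCell = currPos - 1
--         while ((currPos - 1) in filledCells) and (currPos%15 != 0):
--             currPos -= 1
--             boardPositions.append(currPos)
--     return sorted(boardPositions)
-- ===== SOURCE B (Python) =====
-- def determineOtherWords(isConnectedToLetters, cell, filledCells):
--     # Stage 1: keep only the filled cells on cell's line (same column mod 15,
--     # or same row for the horizontal case), dedup and sort them.
--     if isConnectedToLetters:
--         step = 15
--         line = sorted({c for c in filledCells if c % 15 == cell % 15})
--     else:
--         step = 1
--         line = sorted({c for c in filledCells if c // 15 == cell // 15})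
--     below = [c for c in line if c < cell]
--     above = [c for c in line if c > cell]
--     # Stage 2: peel the contiguous run around cell off the two sorted halves.
--     left = []
--     expect = cell - step
--     for c in reversed(below):
--         if c != expect:
--             break
--         left.append(c)
--         expect -= step
--     right = []
--     expect = cell + step
--     for c in above:
--         if c != expect:
--             break
--         right.append(c)
--         expect += step
--     return left[::-1] + [cell] + right
-- ===== Notes on version B (the rewrite author's own statement) =====
-- stated objective: alternative
-- what changed: B never walks the board by membership tests: it filters the filled cells to cell's row/column line, deduplicates and sorts that line, splits it into the parts below and above cell, and peels the contiguous run off the two sorted halves by comparing each element against an expected arithmetic counter (sort-then-scan instead of directional walks over the raw list).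
import Mathlib
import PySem

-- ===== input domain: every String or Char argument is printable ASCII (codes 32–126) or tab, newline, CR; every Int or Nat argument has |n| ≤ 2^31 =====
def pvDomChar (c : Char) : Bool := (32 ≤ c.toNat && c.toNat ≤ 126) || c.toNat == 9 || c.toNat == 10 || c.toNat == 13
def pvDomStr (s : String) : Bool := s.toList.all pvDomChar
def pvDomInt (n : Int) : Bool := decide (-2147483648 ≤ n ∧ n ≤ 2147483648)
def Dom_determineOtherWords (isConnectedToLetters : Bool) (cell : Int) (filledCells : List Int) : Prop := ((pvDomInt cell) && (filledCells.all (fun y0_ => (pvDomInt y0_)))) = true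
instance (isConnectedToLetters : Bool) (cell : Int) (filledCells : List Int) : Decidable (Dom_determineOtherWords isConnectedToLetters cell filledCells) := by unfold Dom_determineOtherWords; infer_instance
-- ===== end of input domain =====

-- B replaces the directional membership walks by a staged pipeline: filter the filled cells to
-- cell's line, dedup+sort, split below/above cell, and peel the contiguous run off the two
-- sorted halves against an expected arithmetic counter.  Objective: alternative (same cost class).

-- termination measure facts, cited by the walk recursions of port A
theorem pvFilterDecUp (fcs : List Int) (s pos : Int) (hs : 0 < s) (hmem : (pos + s) ∈ fcs) :
    (fcs.filter (fun x => decide (pos + s < x))).length <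
      (fcs.filter (fun x => decide (pos < x))).length := by
  have hsub : fcs.filter (fun x => decide (pos + s < x)) =
      (fcs.filter (fun x => decide (pos < x))).filter (fun x => decide (pos + s < x)) := by
    rw [List.filter_filter]
    apply List.filter_congr
    intro x _
    by_cases h : pos + s < x
    · have h2 : pos < x := by omega
      simp [h, h2]
    · simp [h]
  rw [hsub]
  apply List.length_filter_lt_length_iff_exists.mpr
  exact ⟨pos + s, List.mem_filter.mpr ⟨hmem, by simp; omega⟩, by simp⟩

theorem pvFilterDecDown (fcs : List Int) (s pos : Int) (hs : 0 < s) (hmem : (pos - s) ∈ fcs) :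
    (fcs.filter (fun x => decide (x < pos - s))).length <
      (fcs.filter (fun x => decide (x < pos))).length := by
  have hsub : fcs.filter (fun x => decide (x < pos - s)) =
      (fcs.filter (fun x => decide (x < pos))).filter (fun x => decide (x < pos - s)) := by
    rw [List.filter_filter]
    apply List.filter_congr
    intro x _
    by_cases h : x < pos - s
    · have h2 : x < pos := by omega
      simp [h, h2]
    · simp [h]
  rw [hsub]
  apply List.length_filter_lt_length_iff_exists.mpr
  exact ⟨pos - s, List.mem_filter.mpr ⟨hmem, by simp; omega⟩, by simp⟩

-- ===== PORT A =====
-- each Python while loop is a recursion collecting the appended cells in order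
def pvWalkUpA (fcs : List Int) (s : Int) (g : Int → Bool) (pos : Int) : List Int :=
  if h : 0 < s ∧ (pos + s) ∈ fcs ∧ g pos = true then
    (pos + s) :: pvWalkUpA fcs s g (pos + s)
  else []
termination_by (fcs.filter (fun x => decide (pos < x))).length
decreasing_by exact pvFilterDecUp fcs s pos h.1 h.2.1

def pvWalkDownA (fcs : List Int) (s : Int) (g : Int → Bool) (pos : Int) : List Int :=
  if h : 0 < s ∧ (pos - s) ∈ fcs ∧ g pos = true then
    (pos - s) :: pvWalkDownA fcs s g (pos - s)
  else []
termination_by (fcs.filter (fun x => decide (x < pos))).length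
decreasing_by exact pvFilterDecDown fcs s pos h.1 h.2.1

def determineOtherWords (isConnectedToLetters : Bool) (cell : Int) (filledCells : List Int) : List Int :=
  let boardPositions :=
    if isConnectedToLetters then
      cell :: (pvWalkUpA filledCells 15 (fun _ => true) cell ++
               pvWalkDownA filledCells 15 (fun _ => true) cell)
    else
      cell :: (pvWalkUpA filledCells 1 (fun p => decide (PySem.Int.mod p 15 ≠ 14)) cell ++
               pvWalkDownA filledCells 1 (fun p => decide (PySem.Int.mod p 15 ≠ 0)) cell)
  PySem.List.sorted boardPositions (fun x => x)

-- ===== PORT B =====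
-- the two peel loops of Source B ('for c in …: if c != expect: break; append; expect += delta')
def pvPeel (delta : Int) (expect : Int) : List Int → List Int
  | [] => []
  | c :: rest => if c = expect then c :: pvPeel delta (expect + delta) rest else []

def determineOtherWords_alt (isConnectedToLetters : Bool) (cell : Int) (filledCells : List Int) : List Int :=
  -- stage 1: sorted({c for c in filledCells if <on cell's line>}); sorted-of-set is a plain
  -- sorted dedup, so ofList+sorted is exact regardless of CPython's set iteration order
  let sl :=
    if isConnectedToLetters then
      ((15 : Int), PySem.List.sorted (PySem.Set.ofList (filledCells.filter
        (fun c => PySem.Int.mod c 15 == PySem.Int.mod cell 15))) (fun x => x))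
    else
      ((1 : Int), PySem.List.sorted (PySem.Set.ofList (filledCells.filter
        (fun c => PySem.Int.floordiv c 15 == PySem.Int.floordiv cell 15))) (fun x => x))
  let step := sl.1
  let line := sl.2
  let below := line.filter (fun c => decide (c < cell))
  let above := line.filter (fun c => decide (cell < c))
  -- stage 2: peel the contiguous run off reversed(below) and above
  let left := pvPeel (-step) (cell - step) below.reverse
  let right := pvPeel step (cell + step) above
  left.reverse ++ cell :: right      -- left[::-1] + [cell] + right

-- ===== PRECONDITION & SPEC =====
def Spec_determineOtherWords (isConnectedToLetters : Bool) (cell : Int) (filledCells : List Int) (out : List Int) : Prop := out = determineOtherWords_alt isConnectedToLetters cell filledCells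
instance (isConnectedToLetters : Bool) (cell : Int) (filledCells : List Int) (out : List Int) : Decidable (Spec_determineOtherWords isConnectedToLetters cell filledCells out) := by unfold Spec_determineOtherWords; infer_instance

-- ===== CLAIM =====
def Claim_equal_determineOtherWords : Prop := ∀ (isConnectedToLetters : Bool) (cell : Int) (filledCells : List Int), Dom_determineOtherWords isConnectedToLetters cell filledCells → Spec_determineOtherWords isConnectedToLetters cell filledCells (determineOtherWords isConnectedToLetters cell filledCells)

-- ===== LEMMAS AND PROOFS =====

-- A's up-walk is strictly increasing and stays above pos
theorem pvWalkUpA_ord (S : List Int) (s : Int) (g : Int → Bool) (pos : Int) :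
    (pvWalkUpA S s g pos).Pairwise (· < ·) ∧ ∀ x ∈ pvWalkUpA S s g pos, pos < x := by
  generalize hn : (S.filter (fun x => decide (pos < x))).length = n
  induction n using Nat.strong_induction_on generalizing pos with
  | _ n ih =>
    rw [pvWalkUpA]
    by_cases h : 0 < s ∧ (pos + s) ∈ S ∧ g pos = true
    · rw [dif_pos h]
      obtain ⟨ihp, ihm⟩ := ih _ (hn ▸ pvFilterDecUp S s pos h.1 h.2.1) (pos + s) rfl
      refine ⟨List.pairwise_cons.mpr ⟨ihm, ihp⟩, ?_⟩
      intro x hx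
      rcases List.mem_cons.mp hx with h1 | h1
      · omega
      · have := ihm x h1; omega
    · rw [dif_neg h]; simp

-- A's down-walk is strictly decreasing and stays below pos
theorem pvWalkDownA_ord (S : List Int) (s : Int) (g : Int → Bool) (pos : Int) :
    (pvWalkDownA S s g pos).Pairwise (· > ·) ∧ ∀ x ∈ pvWalkDownA S s g pos, x < pos := by
  generalize hn : (S.filter (fun x => decide (x < pos))).length = n
  induction n using Nat.strong_induction_on generalizing pos with
  | _ n ih =>
    rw [pvWalkDownA]
    by_cases h : 0 < s ∧ (pos - s) ∈ S ∧ g pos = true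
    · rw [dif_pos h]
      obtain ⟨ihp, ihm⟩ := ih _ (hn ▸ pvFilterDecDown S s pos h.1 h.2.1) (pos - s) rfl
      refine ⟨List.pairwise_cons.mpr ⟨ihm, ihp⟩, ?_⟩
      intro x hx
      rcases List.mem_cons.mp hx with h1 | h1
      · omega
      · have := ihm x h1; omega
    · rw [dif_neg h]; simp

-- B's upward peel over a sorted line segment computes A's up-walk
theorem pvPeel_up (S : List Int) (s : Int) (g lineP : Int → Bool) (hs : 0 < s)
    (hg : ∀ p, lineP p = true → (g p = true ↔ lineP (p + s) = true))
    (hsp : ∀ x y : Int, lineP x = true → lineP y = true → x < y → x + s ≤ y) :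
    ∀ (l : List Int) (pos : Int), lineP pos = true → l.Pairwise (· < ·) →
      (∀ x, x ∈ l ↔ (x ∈ S ∧ lineP x = true ∧ pos < x)) →
      pvPeel s (pos + s) l = pvWalkUpA S s g pos := by
  intro l
  induction l with
  | nil =>
    intro pos hlp _ hmem
    rw [pvWalkUpA, dif_neg]
    · rfl
    · rintro ⟨-, h1, h2⟩
      exact (List.not_mem_nil (a := pos + s)) ((hmem (pos + s)).mpr ⟨h1, (hg pos hlp).mp h2, by omega⟩)
  | cons c rest ih =>
    intro pos hlp hpair hmem
    obtain ⟨hcr, hrp⟩ := List.pairwise_cons.mp hpair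
    obtain ⟨hcS, hcl, hcpos⟩ := (hmem c).mp (List.mem_cons_self ..)
    by_cases hcond : (pos + s) ∈ S ∧ g pos = true
    · have hlps : lineP (pos + s) = true := (hg pos hlp).mp hcond.2
      have hmemps : pos + s ∈ c :: rest := (hmem _).mpr ⟨hcond.1, hlps, by omega⟩
      have hle : pos + s ≤ c := hsp pos c hlp hcl hcpos
      have hceq : c = pos + s := by
        rcases List.mem_cons.mp hmemps with h1 | h1
        · omega
        · have := hcr _ h1; omega
      rw [pvWalkUpA, dif_pos ⟨hs, hcond⟩, pvPeel, if_pos hceq, hceq]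
      congr 1
      exact ih (pos + s) hlps hrp (fun x => by
        constructor
        · intro hx
          obtain ⟨h1, h2, -⟩ := (hmem x).mp (List.mem_cons_of_mem _ hx)
          have := hcr x hx
          exact ⟨h1, h2, by omega⟩
        · rintro ⟨h1, h2, h3⟩
          rcases List.mem_cons.mp ((hmem x).mpr ⟨h1, h2, by omega⟩) with h4 | h4
          · omega
          · exact h4)
    · have hcne : ¬ c = pos + s := by
        intro hceq
        subst hceq
        exact hcond ⟨hcS, (hg pos hlp).mpr hcl⟩
      rw [pvWalkUpA, dif_neg (by tauto), pvPeel, if_neg hcne]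

-- B's downward peel over the reversed lower line segment computes A's down-walk
theorem pvPeel_down (S : List Int) (s : Int) (g lineP : Int → Bool) (hs : 0 < s)
    (hg : ∀ p, lineP p = true → (g p = true ↔ lineP (p - s) = true))
    (hsp : ∀ x y : Int, lineP x = true → lineP y = true → x < y → x + s ≤ y) :
    ∀ (l : List Int) (pos : Int), lineP pos = true → l.Pairwise (· > ·) →
      (∀ x, x ∈ l ↔ (x ∈ S ∧ lineP x = true ∧ x < pos)) →
      pvPeel (-s) (pos - s) l = pvWalkDownA S s g pos := by
  intro l
  induction l with
  | nil =>
    intro pos hlp _ hmem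
    rw [pvWalkDownA, dif_neg]
    · rfl
    · rintro ⟨-, h1, h2⟩
      exact (List.not_mem_nil (a := pos - s)) ((hmem (pos - s)).mpr ⟨h1, (hg pos hlp).mp h2, by omega⟩)
  | cons c rest ih =>
    intro pos hlp hpair hmem
    obtain ⟨hcr, hrp⟩ := List.pairwise_cons.mp hpair
    obtain ⟨hcS, hcl, hcpos⟩ := (hmem c).mp (List.mem_cons_self ..)
    by_cases hcond : (pos - s) ∈ S ∧ g pos = true
    · have hlps : lineP (pos - s) = true := (hg pos hlp).mp hcond.2
      have hmemps : pos - s ∈ c :: rest := (hmem _).mpr ⟨hcond.1, hlps, by omega⟩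
      have hle : c ≤ pos - s := by have := hsp c pos hcl hlp hcpos; omega
      have hceq : c = pos - s := by
        rcases List.mem_cons.mp hmemps with h1 | h1
        · omega
        · have := hcr _ h1; omega
      rw [pvWalkDownA, dif_pos ⟨hs, hcond⟩, pvPeel, if_pos hceq, hceq]
      congr 1
      have harith : pos - s + -s = (pos - s) - s := by ring
      rw [harith]
      exact ih (pos - s) hlps hrp (fun x => by
        constructor
        · intro hx
          obtain ⟨h1, h2, -⟩ := (hmem x).mp (List.mem_cons_of_mem _ hx)
          have := hcr x hx
          exact ⟨h1, h2, by omega⟩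
        · rintro ⟨h1, h2, h3⟩
          rcases List.mem_cons.mp ((hmem x).mpr ⟨h1, h2, by omega⟩) with h4 | h4
          · omega
          · exact h4)
    · have hcne : ¬ c = pos - s := by
        intro hceq
        subst hceq
        exact hcond ⟨hcS, (hg pos hlp).mpr hcl⟩
      rw [pvWalkDownA, dif_neg (by tauto), pvPeel, if_neg hcne]

-- the shared branch: A's sorted walk output equals B's peeled pipeline output
theorem pvBranchEq (S : List Int) (s : Int) (hs : 0 < s) (gu gd lineP : Int → Bool) (cell : Int)
    (hlc : lineP cell = true)
    (hgu : ∀ p, lineP p = true → (gu p = true ↔ lineP (p + s) = true))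
    (hgd : ∀ p, lineP p = true → (gd p = true ↔ lineP (p - s) = true))
    (hsp : ∀ x y : Int, lineP x = true → lineP y = true → x < y → x + s ≤ y) :
    PySem.List.sorted (cell :: (pvWalkUpA S s gu cell ++ pvWalkDownA S s gd cell)) (fun x => x)
      = (pvPeel (-s) (cell - s)
          (((PySem.List.sorted (PySem.Set.ofList (S.filter lineP)) (fun x => x)).filter
            (fun c => decide (c < cell))).reverse)).reverse
        ++ cell :: pvPeel s (cell + s)
          ((PySem.List.sorted (PySem.Set.ofList (S.filter lineP)) (fun x => x)).filter
            (fun c => decide (cell < c))) := by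
  set line := PySem.List.sorted (PySem.Set.ofList (S.filter lineP)) (fun x => x) with hline
  have hlpair : line.Pairwise (· < ·) := PySem.List.sorted_ofList_pairwise_lt (S.filter lineP)
  have hlmem : ∀ x, x ∈ line ↔ (x ∈ S ∧ lineP x = true) := by
    intro x
    rw [hline, PySem.List.mem_sorted, PySem.Set.mem_ofList, List.mem_filter]
  -- the upper half
  have hup : pvPeel s (cell + s) (line.filter (fun c => decide (cell < c))) =
      pvWalkUpA S s gu cell := by
    apply pvPeel_up S s gu lineP hs hgu hsp _ cell hlc
    · exact hlpair.filter _
    · intro x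
      rw [List.mem_filter, hlmem]
      simp only [decide_eq_true_eq]
      tauto
  -- the lower half
  have hdn : pvPeel (-s) (cell - s) ((line.filter (fun c => decide (c < cell))).reverse) =
      pvWalkDownA S s gd cell := by
    apply pvPeel_down S s gd lineP hs hgd hsp _ cell hlc
    · exact List.pairwise_reverse.mpr (hlpair.filter _)
    · intro x
      rw [List.mem_reverse, List.mem_filter, hlmem]
      simp only [decide_eq_true_eq]
      tauto
  rw [hup, hdn]
  -- name the sorted order: B's output is a strictly increasing rearrangement of A's input list
  obtain ⟨hupp, hupm⟩ := pvWalkUpA_ord S s gu cell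
  obtain ⟨hdnp, hdnm⟩ := pvWalkDownA_ord S s gd cell
  apply PySem.List.sorted_eq_of_perm_of_pairwise_lt
  · exact (((pvWalkDownA S s gd cell).reverse_perm).append_right _).trans
      (List.perm_middle.trans (List.Perm.cons _ List.perm_append_comm))
  · apply List.pairwise_append.mpr
    refine ⟨List.pairwise_reverse.mpr hdnp, List.pairwise_cons.mpr ⟨hupm, hupp⟩, ?_⟩
    intro x hx y hy
    have hxlt : x < cell := hdnm x (List.mem_reverse.mp hx)
    rcases List.mem_cons.mp hy with h1 | h1
    · omega
    · have := hupm y h1; omega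

-- ===== VERDICT =====
theorem determineOtherWords_spec : Claim_equal_determineOtherWords := by
  intro iC cell fcs _
  unfold Spec_determineOtherWords determineOtherWords determineOtherWords_alt
  cases iC with
  | true =>
    simp only [if_true]
    exact pvBranchEq fcs 15 (by norm_num)
      (fun _ => true) (fun _ => true)
      (fun c => PySem.Int.mod c 15 == PySem.Int.mod cell 15) cell
      (by simp)
      (by intro p hp
          simp at hp ⊢
          omega)
      (by intro p hp
          simp at hp ⊢
          omega)
      (by intro x y hx hy hlt
          simp at hx hy
          omega)
  | false =>
    simp only [Bool.false_eq_true, if_false]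
    exact pvBranchEq fcs 1 (by norm_num)
      (fun p => decide (PySem.Int.mod p 15 ≠ 14)) (fun p => decide (PySem.Int.mod p 15 ≠ 0))
      (fun c => PySem.Int.floordiv c 15 == PySem.Int.floordiv cell 15) cell
      (by simp)
      (by intro p hp
          simp at hp ⊢
          omega)
      (by intro p hp
          simp at hp ⊢
          omega)
      (by intro x y hx hy hlt; omega)
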